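-- pv_equiv track=rewrite | github.com/vynhatduy/PY | Lab01/Bài 2/cau12.py | find_smallest_fibonacci
-- ===== SOURCE A (Python) =====
-- def find_smallest_fibonacci(arr):
--     fib = [0, 1]
--     while fib[-1] < min(arr):
--         fib.append(fib[-1] + fib[-2])
--
--     smallest_fibonacci = None
--     for num in arr:
--         if num in fib:
--             if smallest_fibonacci is None or num < smallest_fibonacci:
--                 smallest_fibonacci = num
--     return smallest_fibonacci
-- ===== SOURCE B (Python) =====
-- def find_smallest_fibonacci(arr):
--     m = min(arr)
--     present = set(arr)
--     if 0 in present: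
--         return 0
--
--     def search(a, b):
--         # walk fib values 1, 1, 2, 3, ... ; stop after the first value >= m
--         if a in present:
--             return a
--         if a >= m:
--             return None
--         return search(b, a + b)
--
--     return search(1, 1)
-- ===== Notes on version B (the rewrite author's own statement) =====
-- stated objective: alternative
-- what changed: B computes min(arr) once and puts arr into a set, then recursively walks the fibonacci pairs (a,b) -> (b,a+b) returning the first value present in arr, instead of materialising a fib list (re-evaluating min(arr) on each append) and then scanning arr with a running minimum and a linear 'num in fib' test; it trades A's array scan for a walk over the generated fib values plus one set build.
import Mathlib
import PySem

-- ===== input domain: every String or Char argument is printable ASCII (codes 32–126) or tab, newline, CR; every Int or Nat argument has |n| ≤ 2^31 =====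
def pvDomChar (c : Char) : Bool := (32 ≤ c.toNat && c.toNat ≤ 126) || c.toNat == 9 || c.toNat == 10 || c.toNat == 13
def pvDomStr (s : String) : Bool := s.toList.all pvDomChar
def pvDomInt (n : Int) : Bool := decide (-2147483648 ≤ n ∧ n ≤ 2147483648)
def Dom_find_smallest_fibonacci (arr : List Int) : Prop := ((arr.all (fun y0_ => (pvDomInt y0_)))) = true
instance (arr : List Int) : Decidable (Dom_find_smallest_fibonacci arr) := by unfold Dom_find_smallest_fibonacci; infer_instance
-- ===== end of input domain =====

-- B computes min(arr) once, keeps arr's elements in a set, and recursively walks the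
-- fibonacci pairs (a,b) -> (b,a+b), returning the first value present in arr, instead of
-- materialising a fib list and scanning arr with a running minimum.

-- ===== PORT A =====
-- the while loop 'while fib[-1] < min(arr): fib.append(fib[-1]+fib[-2])':
-- `a`/`b` are fib[-2]/fib[-1]; the three Prop arguments only justify termination.
def fibLoop (m : Int) (fib : List Int) (a b : Int)
    (ha : 0 ≤ a) (hab : a ≤ b) (hb : 1 ≤ b) : List Int :=
  if b < m then
    fibLoop m (fib ++ [a + b]) b (a + b) (by omega) (by omega) (by omega)
  else fib
termination_by (2 * m - (a + b)).toNat
decreasing_by omega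

def find_smallest_fibonacci (arr : List Int) : Option Int :=
  match PySem.List.min? arr (fun x => x) with
  | none => none   -- min([]) raises ValueError; excluded by Pre_
  | some m =>
    let fib := fibLoop m [0, 1] 0 1 (by omega) (by omega) (by omega)
    arr.foldl (fun sm num =>
      if num ∈ fib then
        match sm with
        | none => some num
        | some s => if num < s then some num else sm
      else sm) none

-- ===== PORT B =====
-- B's recursive helper 'search(a, b)': first fib value (from a on) present in arr,
-- stopping after the first value ≥ m. The Prop arguments only justify termination.
def fibSearch (m : Int) (present : PySem.Set Int) (a b : Int)
    (h1 : 1 ≤ a) (h2 : a ≤ b) (h3 : b ≤ a + max m 1) : Option Int :=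
  if PySem.Set.contains present a then some a
  else if hstop : m ≤ a then none
  else fibSearch m present b (a + b) (by omega) (by omega) (by omega)
termination_by (3 * m - (a + b)).toNat
decreasing_by omega

def find_smallest_fibonacci_alt (arr : List Int) : Option Int :=
  match PySem.List.min? arr (fun x => x) with
  | none => none   -- min([]) raises ValueError; excluded by Pre_
  | some m =>
    let present : PySem.Set Int := PySem.Set.ofList arr
    if PySem.Set.contains present 0 then some 0
    else fibSearch m present 1 1 (by omega) (by omega) (by omega)

-- ===== PRECONDITION & SPEC =====
-- A raises ValueError (min of empty sequence) on []; everything else is admitted.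
def Pre_find_smallest_fibonacci (arr : List Int) : Prop := arr ≠ []
instance (arr : List Int) : Decidable (Pre_find_smallest_fibonacci arr) := by
  unfold Pre_find_smallest_fibonacci; infer_instance
def pvWitness_find_smallest_fibonacci : List Int := [4, 3, 10]

def Spec_find_smallest_fibonacci (arr : List Int) (out : Option Int) : Prop := out = find_smallest_fibonacci_alt arr
instance (arr : List Int) (out : Option Int) : Decidable (Spec_find_smallest_fibonacci arr out) := by unfold Spec_find_smallest_fibonacci; infer_instance

-- ===== CLAIM (what is proved, stated in full; the proofs are below) =====
def Claim_equal_find_smallest_fibonacci : Prop := ∀ (arr : List Int), Dom_find_smallest_fibonacci arr → Pre_find_smallest_fibonacci arr → Spec_find_smallest_fibonacci arr (find_smallest_fibonacci arr)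

-- ===== LEMMAS AND PROOFS =====

lemma fibLoop_pairwise (m : Int) (fib : List Int) (a b : Int)
    (ha : 0 ≤ a) (hab : a ≤ b) (hb : 1 ≤ b) :
    fib.Pairwise (· ≤ ·) → (∀ x ∈ fib, x ≤ b) → (fibLoop m fib a b ha hab hb).Pairwise (· ≤ ·) := by
  fun_induction fibLoop m fib a b ha hab hb with
  | case1 m fib a b ha hab hlt ih =>
    intro hp hub
    apply ih
    · refine List.pairwise_append.mpr ⟨hp, by simp, ?_⟩
      intro x hx y hy
      simp at hy
      have := hub x hx; omega
    · intro x hx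
      rcases List.mem_append.mp hx with h | h
      · have := hub x h; omega
      · simp at h; omega
  | case2 => intro hp _; exact hp

lemma fibLoop_append (m : Int) (fib : List Int) (a b : Int)
    (ha : 0 ≤ a) (hab : a ≤ b) (hb : 1 ≤ b) :
    ∀ pre : List Int,
      fibLoop m (pre ++ fib) a b ha hab hb = pre ++ fibLoop m fib a b ha hab hb := by
  fun_induction fibLoop m fib a b ha hab hb with
  | case1 m fib a b ha hab hlt ih =>
    intro pre
    rw [fibLoop]
    simp only [if_pos hlt, List.append_assoc]
    rw [ih pre]
  | case2 m fib a b ha hab hge =>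
    intro pre
    rw [fibLoop]
    simp only [if_neg hge]

lemma fibSearch_eq_find? (m : Int) (present : PySem.Set Int) :
    ∀ (k : Nat) (a b : Int) (ha : 0 ≤ a) (hab : a ≤ b) (hb : 1 ≤ b) (ham : a ≤ max m 1),
      (2 * m - (a + b)).toNat ≤ k →
      fibSearch m present b (a + b) (by omega) (by omega) (by omega)
        = (b :: fibLoop m [] a b (by omega) (by omega) (by omega)).find?
            (fun f => PySem.Set.contains present f) := by
  intro k
  induction k with
  | zero =>
    intro a b ha hab hb ham hk
    rw [fibSearch, fibLoop]
    simp only [if_neg (show ¬ b < m by omega), List.find?_cons]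
    cases hc : PySem.Set.contains present b with
    | true => simp
    | false => simp [dif_pos (show m ≤ b by omega)]
  | succ k ih =>
    intro a b ha hab hb ham hk
    by_cases hlt : b < m
    · rw [fibSearch, fibLoop]
      simp only [if_pos hlt, List.nil_append]
      have happ := fibLoop_append m [] b (a + b) (by omega) (by omega) (by omega) [a + b]
      simp only [List.append_nil] at happ
      rw [happ, List.find?_cons]
      cases hc : PySem.Set.contains present b with
      | true => simp
      | false =>
        simp only [Bool.false_eq_true, if_false,
          dif_neg (show ¬ m ≤ b by omega)]
        rw [ih b (a + b) (by omega) (by omega) (by omega) (by omega) (by omega),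
            List.singleton_append]
    · rw [fibSearch, fibLoop]
      simp only [if_neg hlt, List.find?_cons]
      cases hc : PySem.Set.contains present b with
      | true => simp
      | false => simp [dif_pos (show m ≤ b by omega)]

lemma foldl_step0_some (l : List Int) (s : Int) :
    l.foldl (fun sm num =>
      match sm with
      | none => some num
      | some t => if num < t then some num else sm) (some s)
    = some (l.foldl min s) := by
  induction l generalizing s with
  | nil => rfl
  | cons x l ih =>
    simp only [List.foldl_cons]
    have h : (if x < s then some x else some s) = some (min s x) := by
      split_ifs with h <;> simp [min_def] <;> omega
    rw [h, ih]

lemma find?_min_of_pairwise (q : Int → Bool) (l : List Int) (w : Int)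
    (hp : l.Pairwise (· ≤ ·)) (h : l.find? q = some w) :
    ∀ x ∈ l, q x = true → w ≤ x := by
  induction l with
  | nil => simp at h
  | cons f t ih =>
    by_cases hq : q f = true
    · simp only [List.find?_cons, hq] at h
      injection h with h; subst h
      intro x hx _
      rcases List.mem_cons.mp hx with rfl | hx
      · exact le_refl _
      · exact (List.pairwise_cons.mp hp).1 x hx
    · simp only [List.find?_cons, Bool.of_not_eq_true hq] at h
      intro x hx hqx
      rcases List.mem_cons.mp hx with rfl | hx
      · exact absurd hqx hq
      · exact ih (List.pairwise_cons.mp hp).2 h x hx hqx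

lemma main_lemma (arr fib : List Int) (hp : fib.Pairwise (· ≤ ·)) :
    arr.foldl (fun sm num =>
      if num ∈ fib then
        match sm with
        | none => some num
        | some s => if num < s then some num else sm
      else sm) none
    = fib.find? (fun f => PySem.Set.contains (PySem.Set.ofList arr) f) := by
  have hq : ∀ f : Int, (PySem.Set.contains (PySem.Set.ofList arr) f = true) ↔ f ∈ arr := by
    intro f
    rw [PySem.Set.contains_iff, PySem.Set.mem_ofList]
  have hfold : arr.foldl (fun sm num =>
      if num ∈ fib then
        match sm with
        | none => some num
        | some s => if num < s then some num else sm
      else sm) none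
      = (arr.filter (fun x => decide (x ∈ fib))).foldl (fun sm num =>
        match sm with
        | none => some num
        | some s => if num < s then some num else sm) none := by
    rw [List.foldl_filter]
    simp only [decide_eq_true_eq]
  rw [hfold]
  cases hS : arr.filter (fun x => decide (x ∈ fib)) with
  | nil =>
    simp only [List.foldl_nil]
    symm
    apply List.find?_eq_none.mpr
    intro f hf hfq
    have hfa : f ∈ arr := (hq f).mp (by simpa using hfq)
    have : f ∈ arr.filter (fun x => decide (x ∈ fib)) := by
      simp [List.mem_filter, hfa, hf]
    rw [hS] at this; simp at this
  | cons x l =>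
    simp only [List.foldl_cons]
    rw [foldl_step0_some]
    set v := l.foldl min x with hv
    have hvmem : v ∈ x :: l := by
      rcases PySem.List.foldl_min_mem l x with h | h
      · rw [hv, h]; exact List.mem_cons_self
      · exact List.mem_cons_of_mem _ h
    have hvle : ∀ y ∈ x :: l, v ≤ y := by
      intro y hy
      rcases List.mem_cons.mp hy with rfl | hy
      · exact (PySem.List.foldl_min_le l y).1
      · exact (PySem.List.foldl_min_le l x).2 y hy
    have hvfilter : v ∈ arr.filter (fun x => decide (x ∈ fib)) := by rw [hS]; exact hvmem
    have hvarr : v ∈ arr := (List.mem_filter.mp hvfilter).1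
    have hvfib : v ∈ fib := by
      have := (List.mem_filter.mp hvfilter).2; simpa using this
    cases hf : fib.find? (fun f => PySem.Set.contains (PySem.Set.ofList arr) f) with
    | none =>
      exfalso
      exact List.find?_eq_none.mp hf v hvfib (by simpa using (hq v).mpr hvarr)
    | some w =>
      have hwfib : w ∈ fib := List.mem_of_find?_eq_some hf
      have hwarr : w ∈ arr := (hq w).mp (List.find?_some hf)
      have hwfilter : w ∈ arr.filter (fun x => decide (x ∈ fib)) :=
        List.mem_filter.mpr ⟨hwarr, by simpa using hwfib⟩
      have h1 : v ≤ w := hvle w (by rw [← hS]; exact hwfilter)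
      have h2 : w ≤ v := find?_min_of_pairwise _ fib w hp hf v hvfib ((hq v).mpr hvarr)
      exact congrArg some (le_antisymm h1 h2)

-- ===== VERDICT (by name: the statement is the Claim_ definition above) =====
theorem find_smallest_fibonacci_spec : Claim_equal_find_smallest_fibonacci := by
  intro arr _ _
  unfold Spec_find_smallest_fibonacci find_smallest_fibonacci find_smallest_fibonacci_alt
  cases h : PySem.List.min? arr (fun x => x) with
  | none => rfl
  | some m =>
    simp only
    have hfib : fibLoop m [0, 1] 0 1 (by omega) (by omega) (by omega)
        = [0, 1] ++ fibLoop m [] 0 1 (by omega) (by omega) (by omega) := by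
      exact fibLoop_append m [] 0 1 (by omega) (by omega) (by omega) [0, 1]
    rw [main_lemma arr _ (fibLoop_pairwise m [0,1] 0 1 (by omega) (by omega) (by omega)
      (by simp) (by intro x hx; simp at hx; omega))]
    rw [hfib]
    have hs := fibSearch_eq_find? m (PySem.Set.ofList arr) (2 * m - 1).toNat 0 1
      (by omega) (by omega) (by omega) (by omega) (by omega)
    norm_num at hs
    rw [hs]
    by_cases h0 : 0 ∈ arr <;> simp [h0]
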